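-- pv_equiv track=rewrite | github.com/EricReno/LicensePlateRecognition | deploy/inference.py | decodePlate
-- ===== SOURCE A (Python) =====
-- def decodePlate(index):
--     pre = 0
--     n_index = []
--     for i in range(len(index)):
--         if index[i] != 0 and index[i] != pre:
--             n_index.append(i)
--         pre = index[i]
--     return n_index
-- ===== SOURCE B (Python) =====
-- def decodePlate(index):
--     # Two-pointer run scanner: jump run by run and emit the first index of each
--     # non-zero maximal run (no per-element prev-state bookkeeping).
--     res = []
--     n = len(index)
--     i = 0
--     while i < n:
--         j = i + 1
--         while j < n and index[j] == index[i]: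
--             j += 1
--         if index[i] != 0:
--             res.append(i)
--         i = j
--     return res
-- ===== Notes on version B (the rewrite author's own statement) =====
-- stated objective: alternative
-- what changed: Replaces the per-element loop carrying a 'pre' state with a two-pointer scan over maximal runs of equal values, emitting the first index of each non-zero run.
import Mathlib
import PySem

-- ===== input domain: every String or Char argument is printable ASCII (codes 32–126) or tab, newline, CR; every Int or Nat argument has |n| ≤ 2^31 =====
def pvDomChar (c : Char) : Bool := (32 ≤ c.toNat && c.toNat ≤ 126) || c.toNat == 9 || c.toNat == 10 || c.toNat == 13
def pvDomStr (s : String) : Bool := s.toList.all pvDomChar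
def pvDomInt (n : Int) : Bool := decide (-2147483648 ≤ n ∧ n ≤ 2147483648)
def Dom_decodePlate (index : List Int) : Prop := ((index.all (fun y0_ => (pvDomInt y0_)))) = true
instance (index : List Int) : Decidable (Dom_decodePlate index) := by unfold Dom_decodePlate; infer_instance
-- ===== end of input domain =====

-- B replaces A's per-element loop with a stateless two-pointer run scan; objective: alternative (same cost).

-- ===== PORT A =====
-- loop body of A: state (pre, n_index), loop variable i
def pvStepA (index : List Int) (s : Int × List Int) (i : Int) : Int × List Int :=
  let x := PySem.List.pyGetD index i 0
  (x, if x ≠ 0 ∧ x ≠ s.1 then s.2 ++ [i] else s.2)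

def decodePlate (index : List Int) : List Int :=
  ((PySem.List.pyRange 0 (index.length : Int) 1).foldl (pvStepA index) (0, [])).2

-- ===== PORT B =====
-- inner while: advance j past the run of values equal to v
def pvRunEnd (index : List Int) (v : Int) (j : Nat) : Nat :=
  if h : j < index.length then
    if index[j] = v then pvRunEnd index v (j + 1) else j
  else j
termination_by index.length - j

-- needed by pvScan's termination: the run end never moves backwards
theorem pvRunEnd_ge (index : List Int) (v : Int) (j : Nat) : j ≤ pvRunEnd index v j := by
  fun_induction pvRunEnd index v j <;> omega

-- outer while of B
def pvScan (index : List Int) (i : Nat) (res : List Int) : List Int :=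
  if h : i < index.length then
    let j := pvRunEnd index index[i] (i + 1)
    pvScan index j (if index[i] ≠ 0 then res ++ [(i : Int)] else res)
  else res
termination_by index.length - i
decreasing_by
  have := pvRunEnd_ge index index[i] (i + 1)
  omega

def decodePlate_alt (index : List Int) : List Int :=
  pvScan index 0 []

-- ===== PRECONDITION & SPEC =====
def Spec_decodePlate (index : List Int) (out : List Int) : Prop := out = decodePlate_alt index
instance (index : List Int) (out : List Int) : Decidable (Spec_decodePlate index out) := by unfold Spec_decodePlate; infer_instance

-- ===== CLAIM (what is proved, stated in full; the proofs are below) =====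
def Claim_equal_decodePlate : Prop := ∀ (index : List Int), Dom_decodePlate index → Spec_decodePlate index (decodePlate index)

-- ===== LEMMAS AND PROOFS =====

theorem pvRunEnd_le (index : List Int) (v : Int) (j : Nat) (h : j ≤ index.length) :
    pvRunEnd index v j ≤ index.length := by
  fun_induction pvRunEnd index v j <;> omega

theorem pvRunEnd_run (index : List Int) (v : Int) (j : Nat) :
    ∀ k (hk : k < index.length), j ≤ k → k < pvRunEnd index v j → index[k] = v := by
  fun_induction pvRunEnd index v j with
  | case1 j h hv ih =>
    intro k hk hjk hkr
    rcases Nat.eq_or_lt_of_le hjk with rfl | hlt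
    · exact hv
    · exact ih k hk hlt hkr
  | case2 j h hv => intro k hk hjk hkr; omega
  | case3 j h => intro k hk hjk hkr; omega

theorem pvRunEnd_stop (index : List Int) (v : Int) (j : Nat)
    (h : pvRunEnd index v j < index.length) : index[pvRunEnd index v j] ≠ v := by
  fun_induction pvRunEnd index v j with
  | case1 j hj hv ih => exact ih h
  | case2 j hj hv => exact hv
  | case3 j hj => omega

-- folding A's body over a range of indices that all hold the current pre-value is a no-op
theorem pvFold_run (index : List Int) (v : Int) (acc : List Int) (i : Nat) :
    ∀ (j : Nat), i ≤ j → j ≤ index.length →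
      (∀ k (hk : k < index.length), i ≤ k → k < j → index[k] = v) →
      (PySem.List.pyRange (i : Int) (j : Int) 1).foldl (pvStepA index) (v, acc) = (v, acc) := by
  intro j
  induction j with
  | zero =>
    intro hij _ _
    rw [PySem.List.pyRange_one_eq_nil (by omega)]
    simp
  | succ j ih =>
    intro hij hjn hrun
    rcases Nat.eq_or_lt_of_le hij with rfl | hlt
    · rw [PySem.List.pyRange_one_eq_nil (by omega)]; simp
    · have hij' : i ≤ j := by omega
      have : ((j + 1 : Nat) : Int) = (j : Int) + 1 := by push_cast; ring
      rw [this, PySem.List.pyRange_one_succ_right (by exact_mod_cast hij'),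
        List.foldl_append,
        ih hij' (by omega) (fun k hk h1 h2 => hrun k hk h1 (by omega))]
      have hjlt : j < index.length := by omega
      have hx : PySem.List.pyGetD index (j : Int) 0 = index[j] := by
        simp [PySem.List.pyGetD_natCast, List.getD, List.getElem?_eq_getElem hjlt]
      have hv : index[j] = v := hrun j hjlt hij' (by omega)
      simp [pvStepA, hx, hv]

theorem pvMainAux (index : List Int) :
    ∀ (d i : Nat) (pre : Int) (acc : List Int), index.length - i ≤ d → i ≤ index.length →
      (∀ h : i < index.length, index[i] ≠ 0 → index[i] ≠ pre) →
      ((PySem.List.pyRange (i : Int) (index.length : Int) 1).foldl (pvStepA index) (pre, acc)).2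
        = pvScan index i acc := by
  intro d
  induction d with
  | zero =>
    intro i pre acc hd hin hpre
    have : i = index.length := by omega
    subst this
    rw [PySem.List.pyRange_one_eq_nil (by omega), pvScan]
    simp
  | succ d ih =>
    intro i pre acc hd hin hpre
    rcases Nat.eq_or_lt_of_le hin with rfl | hlt
    · rw [PySem.List.pyRange_one_eq_nil (by omega), pvScan]
      simp
    · set x := index[i] with hxdef
      set j := pvRunEnd index x (i + 1) with hjdef
      have hj1 : i + 1 ≤ j := pvRunEnd_ge index x (i + 1)
      have hjn : j ≤ index.length := pvRunEnd_le index x (i + 1) (by omega)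
      -- split the range: [i] ++ run (i+1..j) ++ rest (j..n)
      have hsplit1 : (PySem.List.pyRange (i : Int) (index.length : Int) 1)
          = PySem.List.pyRange (i : Int) ((i + 1 : Nat) : Int) 1
            ++ PySem.List.pyRange ((i + 1 : Nat) : Int) (index.length : Int) 1 :=
        PySem.List.pyRange_one_append _ _ _ (by omega) (by omega)
      have hsplit2 : (PySem.List.pyRange ((i + 1 : Nat) : Int) (index.length : Int) 1)
          = PySem.List.pyRange ((i + 1 : Nat) : Int) ((j : Nat) : Int) 1
            ++ PySem.List.pyRange ((j : Nat) : Int) (index.length : Int) 1 :=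
        PySem.List.pyRange_one_append _ _ _ (by omega) (by omega)
      have hone : PySem.List.pyRange (i : Int) ((i + 1 : Nat) : Int) 1 = [(i : Int)] := by
        have : ((i + 1 : Nat) : Int) = (i : Int) + 1 := by push_cast; ring
        rw [this, PySem.List.pyRange_one_singleton]
      have hx : PySem.List.pyGetD index (i : Int) 0 = x := by
        simp [PySem.List.pyGetD_natCast, List.getD, List.getElem?_eq_getElem hlt, hxdef]
      have hstep : pvStepA index (pre, acc) (i : Int)
          = (x, if x ≠ 0 then acc ++ [(i : Int)] else acc) := by
        simp only [pvStepA, hx]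
        by_cases h0 : x = 0
        · simp [h0]
        · have hne : x ≠ pre := hpre hlt h0
          simp [h0, hne]
      rw [hsplit1, hsplit2, List.foldl_append, hone]
      simp only [List.foldl_cons, List.foldl_nil]
      rw [hstep, List.foldl_append,
        pvFold_run index x _ (i + 1) j hj1 hjn
          (fun k hk h1 h2 => pvRunEnd_run index x (i + 1) k hk h1 h2)]
      rw [ih j x _ (by omega) (by omega)
        (fun hjlt h0 => pvRunEnd_stop index x (i + 1) hjlt)]
      conv_rhs => rw [pvScan]
      simp only [hlt, dite_true]
      rfl

-- ===== VERDICT (by name: the statement is the Claim_ definition above) =====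
theorem decodePlate_spec : Claim_equal_decodePlate := by
  intro index _
  unfold Spec_decodePlate decodePlate decodePlate_alt
  have := pvMainAux index index.length 0 0 [] (by omega) (by omega) (fun _ h0 => h0)
  simpa using this
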